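-- pv_equiv track=rewrite | github.com/Johts/labs-mc102-python | lab06.py | correlacao_cruzada
-- ===== SOURCE A (Python) =====
-- def correlacao_cruzada(n1: list[int], mask: list[int]) -> list[int]:
--     """Calcula a correlação cruzada entre n1 e a máscara mask"""
--
--     cross_correlation = []
--     for i in range(len(n1) - len(mask) + 1):
--         local_sum = 0
--         for j in range(len(mask)):
--             # Calcula o produto interno para a posição i
--             local_sum += n1[i + j] * mask[j]
--         cross_correlation.append(local_sum)
--     return cross_correlation
-- ===== SOURCE B (Python) =====
-- def correlacao_cruzada(n1: list[int], mask: list[int]) -> list[int]: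
--     """Cross-correlation computed mask-coefficient by mask-coefficient:
--     start from a zero output and accumulate each mask[j]'s contribution
--     across all output positions (transposed loop order vs. the per-window
--     dot product)."""
--     L = len(n1) - len(mask) + 1
--     if L <= 0:
--         return []
--     out = [0] * L
--     for j, mj in enumerate(mask):
--         out = [v + n1[i + j] * mj for i, v in enumerate(out)]
--     return out
-- ===== Notes on version B (the rewrite author's own statement) =====
-- stated objective: alternative
-- what changed: B replaces the per-window inner dot-product loop by a transposed accumulation: it starts from a zero output vector and, for each mask coefficient, adds that coefficient's contribution to every output position in one sweep.
import Mathlib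
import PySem

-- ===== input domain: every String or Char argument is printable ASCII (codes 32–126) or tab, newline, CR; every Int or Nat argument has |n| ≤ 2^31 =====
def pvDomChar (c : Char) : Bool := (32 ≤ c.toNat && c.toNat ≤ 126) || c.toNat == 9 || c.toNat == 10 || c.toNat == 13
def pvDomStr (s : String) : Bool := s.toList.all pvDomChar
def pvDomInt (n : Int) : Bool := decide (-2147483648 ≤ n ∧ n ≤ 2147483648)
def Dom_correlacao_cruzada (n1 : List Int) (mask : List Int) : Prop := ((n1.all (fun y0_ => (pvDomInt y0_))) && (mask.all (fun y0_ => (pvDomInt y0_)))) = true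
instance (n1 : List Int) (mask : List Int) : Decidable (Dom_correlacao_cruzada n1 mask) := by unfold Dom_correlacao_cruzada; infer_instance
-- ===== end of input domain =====

-- B computes the same cross-correlation by transposed accumulation (per mask
-- coefficient instead of per output window): alternative structure, same cost.

-- ===== PORT A =====
def correlacao_cruzada (n1 : List Int) (mask : List Int) : List Int :=
  (PySem.List.pyRange 0 ((n1.length : Int) - (mask.length : Int) + 1) 1).foldl
    (fun cc i =>
      cc ++ [ (PySem.List.pyRange 0 (mask.length : Int) 1).foldl
        (fun s j => s + PySem.List.pyGetD n1 (i + j) 0 * PySem.List.pyGetD mask j 0) 0 ])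
    []

-- ===== PORT B =====
def correlacao_cruzada_alt (n1 : List Int) (mask : List Int) : List Int :=
  let L : Int := (n1.length : Int) - (mask.length : Int) + 1
  if L ≤ 0 then []
  else
    (PySem.List.enumerate mask 0).foldl
      (fun out jm =>
        (PySem.List.enumerate out 0).map
          (fun iv => iv.2 + PySem.List.pyGetD n1 (iv.1 + jm.1) 0 * jm.2))
      (List.replicate L.toNat 0)

-- ===== PRECONDITION & SPEC =====
def Spec_correlacao_cruzada (n1 : List Int) (mask : List Int) (out : List Int) : Prop := out = correlacao_cruzada_alt n1 mask
instance (n1 : List Int) (mask : List Int) (out : List Int) : Decidable (Spec_correlacao_cruzada n1 mask out) := by unfold Spec_correlacao_cruzada; infer_instance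

-- ===== CLAIM (what is proved, stated in full; the proofs are below) =====
def Claim_equal_correlacao_cruzada : Prop := ∀ (n1 : List Int) (mask : List Int), Dom_correlacao_cruzada n1 mask → Spec_correlacao_cruzada n1 mask (correlacao_cruzada n1 mask)

-- ===== LEMMAS AND PROOFS =====

-- partial dot product of the window at i against the mask suffix starting at offset j0
def pds (n1 : List Int) (i : Int) (j0 : Int) : List Int → Int
  | [] => 0
  | v :: vs => PySem.List.pyGetD n1 (i + j0) 0 * v + pds n1 i (j0 + 1) vs

theorem inner_eq (n1 mask : List Int) (i : Int) :
    ∀ (ms : List Int) (j0 : Nat) (s : Int), ms = mask.drop j0 →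
    (PySem.List.pyRange (j0 : Int) (mask.length : Int) 1).foldl
      (fun s j => s + PySem.List.pyGetD n1 (i + j) 0 * PySem.List.pyGetD mask j 0) s
    = s + pds n1 i (j0 : Int) ms := by
  intro ms
  induction ms with
  | nil =>
    intro j0 s h
    have hle : mask.length ≤ j0 := by
      by_contra hlt
      have := List.drop_eq_nil_iff.mp h.symm
      omega
    rw [PySem.List.pyRange_one_eq_nil (by exact_mod_cast hle)]
    simp [pds]
  | cons v vs ih =>
    intro j0 s h
    have hlt : j0 < mask.length := by
      by_contra hge
      rw [List.drop_eq_nil_iff.mpr (by omega)] at h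
      exact absurd h (by simp)
    have hv : mask[j0] = v := by
      have hc := List.getElem_cons_drop (as := mask) (i := j0) hlt
      rw [← h] at hc
      exact (List.cons.injEq _ _ _ _ ▸ hc).1
    have hvs : vs = mask.drop (j0 + 1) := by
      have hc := List.getElem_cons_drop (as := mask) (i := j0) hlt
      rw [← h] at hc
      exact ((List.cons.injEq _ _ _ _ ▸ hc).2).symm
    rw [PySem.List.pyRange_one_cons (by exact_mod_cast hlt)]
    simp only [List.foldl_cons]
    have hcast : ((j0 : Int) + 1) = ((j0 + 1 : Nat) : Int) := by push_cast; ring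
    rw [hcast, ih (j0 + 1) _ hvs]
    have hm : PySem.List.pyGetD mask (j0 : Int) 0 = v := by
      rw [PySem.List.pyGetD_natCast, List.getD_eq_getElem _ _ hlt, hv]
    rw [hm]
    simp only [pds]
    push_cast
    ring

theorem A_char (n1 mask : List Int) :
    correlacao_cruzada n1 mask
    = (PySem.List.pyRange 0 ((n1.length : Int) - (mask.length : Int) + 1) 1).map
        (fun i => pds n1 i 0 mask) := by
  unfold correlacao_cruzada
  rw [PySem.List.foldl_append_singleton_eq_map, List.nil_append]
  refine List.map_congr_left ?_
  intro i _
  have h0 : ((0 : Nat) : Int) = 0 := by norm_num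
  have := inner_eq n1 mask i mask 0 0 (by simp)
  rw [h0] at this
  simpa using this

theorem enumerate_map_pyRange (h : Int → Int) (N : Int) :
    PySem.List.enumerate ((PySem.List.pyRange 0 N 1).map h) 0
    = (PySem.List.pyRange 0 N 1).map (fun i => (i, h i)) := by
  apply List.ext_getElem
  · simp [PySem.List.length_enumerate]
  · intro k h1 h2
    rw [PySem.List.getElem_enumerate]
    have h3 : k < (PySem.List.pyRange 0 N 1).length := by
      simpa [PySem.List.length_enumerate] using h1
    simp [PySem.List.getElem_pyRange_one (h := h3)]

theorem B_fold (n1 : List Int) (N : Int) :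
    ∀ (ms : List Int) (j0 : Int) (h : Int → Int),
    (PySem.List.enumerate ms j0).foldl
      (fun out jm =>
        (PySem.List.enumerate out 0).map
          (fun iv => iv.2 + PySem.List.pyGetD n1 (iv.1 + jm.1) 0 * jm.2))
      ((PySem.List.pyRange 0 N 1).map h)
    = (PySem.List.pyRange 0 N 1).map (fun i => h i + pds n1 i j0 ms) := by
  intro ms
  induction ms with
  | nil => intro j0 h; simp [PySem.List.enumerate_nil, pds]
  | cons v vs ih =>
    intro j0 h
    rw [PySem.List.enumerate_cons]
    simp only [List.foldl_cons]
    rw [enumerate_map_pyRange, List.map_map]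
    have hstep :
        ((fun iv : Int × Int => iv.2 + PySem.List.pyGetD n1 (iv.1 + j0) 0 * v) ∘
          (fun i : Int => (i, h i)))
        = (fun i : Int => h i + PySem.List.pyGetD n1 (i + j0) 0 * v) := rfl
    rw [hstep, ih (j0 + 1) _]
    refine List.map_congr_left ?_
    intro i _
    simp only [pds]
    ring

theorem B_char (n1 mask : List Int) :
    correlacao_cruzada_alt n1 mask
    = (PySem.List.pyRange 0 ((n1.length : Int) - (mask.length : Int) + 1) 1).map
        (fun i => pds n1 i 0 mask) := by
  unfold correlacao_cruzada_alt
  set L : Int := (n1.length : Int) - (mask.length : Int) + 1 with hL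
  by_cases hle : L ≤ 0
  · rw [if_pos hle, PySem.List.pyRange_one_eq_nil (by omega)]
    simp
  · rw [if_neg hle]
    have hrepl : List.replicate L.toNat (0 : Int)
        = (PySem.List.pyRange 0 L 1).map (fun _ => (0 : Int)) := by
      rw [List.map_const', PySem.List.length_pyRange_one]
      norm_num
    rw [hrepl, B_fold n1 L mask 0 (fun _ => 0)]
    simp

-- ===== VERDICT (by name: the statement is the Claim_ definition above) =====
theorem correlacao_cruzada_spec : Claim_equal_correlacao_cruzada := by
  intro n1 mask _
  unfold Spec_correlacao_cruzada
  rw [A_char, B_char]
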